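-- pv_equiv track=rewrite | github.com/Matamaru/caesar_ocr | apps/domains/fehlerprotokoll/generator.py | _prev_month
-- ===== SOURCE A (Python) =====
-- def _prev_month(year: int, month: int, offset: int = 1) -> tuple[int, int]:
--     y, m = year, month
--     for _ in range(offset):
--         m -= 1
--         if m == 0:
--             m = 12
--             y -= 1
--     return y, m
-- ===== SOURCE B (Python) =====
-- def _prev_month(year: int, month: int, offset: int = 1) -> tuple[int, int]:
--     # O(1) closed form: divmod on the total month count instead of stepping offset times.
--     if offset <= 0:
--         return (year, month)
--     y, m = divmod(year * 12 + (month - 1) - offset, 12)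
--     return (y, m + 1)
-- ===== Notes on version B (the rewrite author's own statement) =====
-- stated objective: faster
-- what changed: Replaces the step-by-step loop over range(offset) with a single divmod on the total month count year*12+(month-1)-offset.
-- intended difference: On out-of-range start months (month <= 0 with offset >= 1, or month - offset > 12) A returns a raw unnormalized month such as month-offset <= 0 or > 12 because its wrap test only fires at exactly 0, while B returns the calendar-normalized (year, month in 1..12), the intended value for month arithmetic. — e.g. on _prev_month(2020, 0, 1): A returns (2020, -1), B returns (2019, 11)
import Mathlib
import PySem

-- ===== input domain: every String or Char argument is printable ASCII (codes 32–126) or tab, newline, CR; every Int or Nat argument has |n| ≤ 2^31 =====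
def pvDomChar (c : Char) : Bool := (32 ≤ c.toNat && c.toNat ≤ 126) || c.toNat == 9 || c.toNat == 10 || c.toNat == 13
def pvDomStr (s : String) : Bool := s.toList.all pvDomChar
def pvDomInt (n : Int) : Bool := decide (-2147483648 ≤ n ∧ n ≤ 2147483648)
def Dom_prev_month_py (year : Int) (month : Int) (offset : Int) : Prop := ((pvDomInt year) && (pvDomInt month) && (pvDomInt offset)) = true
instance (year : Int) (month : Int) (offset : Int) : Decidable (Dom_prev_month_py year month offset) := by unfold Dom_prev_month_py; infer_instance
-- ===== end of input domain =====

-- B replaces A's O(offset) month-stepping loop with one O(1) divmod on the total month count.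

-- ===== PORT A =====
-- one iteration of A's loop body: m -= 1; if m == 0: m = 12; y -= 1
def prevStepA (p : Int × Int) : Int × Int :=
  if p.2 - 1 = 0 then (p.1 - 1, 12) else (p.1, p.2 - 1)

def prev_month_py (year : Int) (month : Int) (offset : Int) : Int × Int :=
  (PySem.List.pyRange 0 offset 1).foldl (fun p _ => prevStepA p) (year, month)

-- ===== PORT B =====
def prev_month_py_alt (year : Int) (month : Int) (offset : Int) : Int × Int :=
  if offset ≤ 0 then (year, month)
  else
    let t := year * 12 + (month - 1) - offset
    (PySem.Int.floordiv t 12, PySem.Int.mod t 12 + 1)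

-- ===== PRECONDITION & SPEC =====
-- On out-of-range start months (month ≤ 0 with offset ≥ 1, or month - offset > 12) A returns a raw
-- unnormalized month (month-offset ≤ 0 or > 12) because its wrap test only fires at exactly 0,
-- while B returns the calendar-normalized (year, month in 1..12), the intended value.
def D_prev_month_py (year : Int) (month : Int) (offset : Int) : Prop :=
  1 ≤ offset ∧ (month ≤ 0 ∨ offset < month - 12)
instance (year : Int) (month : Int) (offset : Int) : Decidable (D_prev_month_py year month offset) := by unfold D_prev_month_py; infer_instance

def Spec_prev_month_py (year : Int) (month : Int) (offset : Int) (out : Int × Int) : Prop :=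
  ¬ D_prev_month_py year month offset → out = prev_month_py_alt year month offset
instance (year : Int) (month : Int) (offset : Int) (out : Int × Int) : Decidable (Spec_prev_month_py year month offset out) := by unfold Spec_prev_month_py; infer_instance

def pvDiffWitness_prev_month_py : Int × Int × Int := (2020, 0, 1)
def pvDiffWitnessOut_prev_month_py : (Int × Int) × (Int × Int) := ((2020, -1), (2019, 11))

-- ===== CLAIM (what is proved, stated in full; the proofs are below) =====
def Claim_unchanged_prev_month_py : Prop := ∀ (year : Int) (month : Int) (offset : Int), Dom_prev_month_py year month offset → Spec_prev_month_py year month offset (prev_month_py year month offset)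
def Claim_changed_prev_month_py : Prop := Dom_prev_month_py (pvDiffWitness_prev_month_py.1) (pvDiffWitness_prev_month_py.2.1) (pvDiffWitness_prev_month_py.2.2) ∧ D_prev_month_py (pvDiffWitness_prev_month_py.1) (pvDiffWitness_prev_month_py.2.1) (pvDiffWitness_prev_month_py.2.2) ∧ prev_month_py (pvDiffWitness_prev_month_py.1) (pvDiffWitness_prev_month_py.2.1) (pvDiffWitness_prev_month_py.2.2) = pvDiffWitnessOut_prev_month_py.1 ∧ prev_month_py_alt (pvDiffWitness_prev_month_py.1) (pvDiffWitness_prev_month_py.2.1) (pvDiffWitness_prev_month_py.2.2) = pvDiffWitnessOut_prev_month_py.2 ∧ pvDiffWitnessOut_prev_month_py.1 ≠ pvDiffWitnessOut_prev_month_py.2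
def Claim_exact_prev_month_py : Prop := ∀ (year : Int) (month : Int) (offset : Int), Dom_prev_month_py year month offset → D_prev_month_py year month offset → prev_month_py year month offset ≠ prev_month_py_alt year month offset

-- ===== LEMMAS AND PROOFS =====

-- the fold over a range ignores the element: it is n-fold iteration
def prevIter : Nat → Int × Int → Int × Int
  | 0, p => p
  | n+1, p => prevIter n (prevStepA p)

theorem foldl_prevStep (l : List Int) (p : Int × Int) :
    l.foldl (fun p _ => prevStepA p) p = prevIter l.length p := by
  induction l generalizing p with
  | nil => rfl
  | cons a t ih => simp [List.foldl, prevIter, ih]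

-- rewriting equal divmod arguments
theorem prevPairDiv (a b : Int) (h : a = b) :
    (PySem.Int.floordiv a 12, PySem.Int.mod a 12 + 1)
      = (PySem.Int.floordiv b 12, PySem.Int.mod b 12 + 1) := by rw [h]

-- full characterization of A's loop after n iterations
theorem prevIter_char (n : Nat) (y m : Int) :
    prevIter n (y, m) =
      if m ≤ 0 ∨ (n : Int) < m - 12 then (y, m - n)
      else (PySem.Int.floordiv (12*y + (m-1) - n) 12, PySem.Int.mod (12*y + (m-1) - n) 12 + 1) := by
  induction n generalizing y m with
  | zero =>
    simp only [Nat.cast_zero, prevIter]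
    by_cases h : m ≤ 0 ∨ (0:Int) < m - 12
    · rw [if_pos h]
      simp
    · rw [if_neg h]
      have h1 : 1 ≤ m := by omega
      rw [PySem.Int.floordiv_eq_ediv_of_pos (by omega), PySem.Int.mod_eq_emod_of_pos (by omega)]
      simp only [Prod.mk.injEq]
      omega
  | succ n ih =>
    rw [show prevIter (n+1) (y, m) = prevIter n (prevStepA (y, m)) from rfl]
    by_cases hm1 : m = 1
    · subst hm1
      rw [show prevStepA (y, 1) = (y - 1, 12) from by simp [prevStepA], ih]
      push_cast
      split_ifs with h1 h2 h2
      · exact absurd h1 (by simp only [false_or]; omega)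
      · exact absurd h1 (by simp only [false_or]; omega)
      · exact absurd h2 (by simp only [false_or]; omega)
      · exact prevPairDiv _ _ (by ring)
    · rw [show prevStepA (y, m) = (y, m - 1) from by
          unfold prevStepA; rw [if_neg (by omega)], ih]
      push_cast
      split_ifs with h1 h2 h2
      · simp only [Prod.mk.injEq, true_and]
        ring
      · exact absurd h1 (by omega)
      · exact absurd h2 (by omega)
      · exact prevPairDiv _ _ (by ring)

-- Python % with positive divisor 12 lands in [0, 12)
theorem prevMod_bounds (t : Int) : 0 ≤ PySem.Int.mod t 12 ∧ PySem.Int.mod t 12 < 12 := by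
  rw [PySem.Int.mod_eq_emod_of_pos (by norm_num)]
  exact ⟨Int.emod_nonneg _ (by norm_num), Int.emod_lt_of_pos _ (by norm_num)⟩

-- ===== VERDICT (by name: the statement is the Claim_ definition above) =====
theorem prev_month_py_spec : Claim_unchanged_prev_month_py := by
  intro year month offset _
  unfold Spec_prev_month_py D_prev_month_py
  intro hnd
  unfold prev_month_py prev_month_py_alt
  by_cases ho : offset ≤ 0
  · rw [PySem.List.pyRange_one_eq_nil (by omega), if_pos ho]
    rfl
  · rw [foldl_prevStep, PySem.List.length_pyRange_one, if_neg ho, prevIter_char]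
    have hoz : (((offset - 0).toNat : Int)) = offset := by omega
    rw [hoz]
    rw [if_neg (by omega)]
    rw [show 12*year + (month-1) - offset = year*12 + (month-1) - offset from by ring]
theorem prev_month_py_changed : Claim_changed_prev_month_py := by
  unfold Claim_changed_prev_month_py; decide

theorem prev_month_py_tight : Claim_exact_prev_month_py := by
  intro year month offset _ hd
  obtain ⟨h1, h2⟩ := hd
  unfold prev_month_py prev_month_py_alt
  rw [foldl_prevStep, PySem.List.length_pyRange_one, prevIter_char]
  have hoz : (((offset - 0).toNat : Int)) = offset := by omega
  rw [hoz, if_pos (by omega), if_neg (by omega)]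
  intro heq
  have hb := prevMod_bounds (year*12 + (month-1) - offset)
  simp only [Prod.mk.injEq] at heq
  omega
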